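-- pv_equiv track=rewrite | github.com/aschau/aschau.github.io | games/beamlab/generate.py | find_gem_candidates
-- ===== SOURCE A (Python) =====
-- GRID = 6
--
-- def find_gem_candidates(beam_path, occupied, walls_set):
--     """Find all cells adjacent to the beam path that could hold a gem."""
--     candidates = set()
--     for r, c in beam_path:
--         for dr, dc in [(-1, 0), (1, 0), (0, -1), (0, 1)]:
--             nr, nc = r + dr, c + dc
--             if (0 <= nr < GRID and 0 <= nc < GRID and
--                 (nr, nc) not in beam_path and
--                 (nr, nc) not in occupied and
--                 (nr, nc) not in walls_set):
--                 candidates.add((nr, nc))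
--     return sorted(candidates)
-- ===== SOURCE B (Python) =====
-- GRID = 6
--
-- def find_gem_candidates(beam_path, occupied, walls_set):
--     """Find all cells adjacent to the beam path that could hold a gem."""
--     result = []
--     for r in range(GRID):
--         for c in range(GRID):
--             if (r, c) in beam_path or (r, c) in occupied or (r, c) in walls_set:
--                 continue
--             if any(n in beam_path for n in ((r - 1, c), (r + 1, c), (r, c - 1), (r, c + 1))):
--                 result.append((r, c))
--     return result
-- ===== Notes on version B (the rewrite author's own statement) =====
-- stated objective: alternative
-- what changed: Inverts the traversal: instead of expanding the four neighbors of each beam cell into a set and sorting it, B scans all GRID*GRID cells in row-major (already sorted) order and appends a cell directly when it is free and has a neighbor on the beam path, so no set and no final sort are needed.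
import Mathlib
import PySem

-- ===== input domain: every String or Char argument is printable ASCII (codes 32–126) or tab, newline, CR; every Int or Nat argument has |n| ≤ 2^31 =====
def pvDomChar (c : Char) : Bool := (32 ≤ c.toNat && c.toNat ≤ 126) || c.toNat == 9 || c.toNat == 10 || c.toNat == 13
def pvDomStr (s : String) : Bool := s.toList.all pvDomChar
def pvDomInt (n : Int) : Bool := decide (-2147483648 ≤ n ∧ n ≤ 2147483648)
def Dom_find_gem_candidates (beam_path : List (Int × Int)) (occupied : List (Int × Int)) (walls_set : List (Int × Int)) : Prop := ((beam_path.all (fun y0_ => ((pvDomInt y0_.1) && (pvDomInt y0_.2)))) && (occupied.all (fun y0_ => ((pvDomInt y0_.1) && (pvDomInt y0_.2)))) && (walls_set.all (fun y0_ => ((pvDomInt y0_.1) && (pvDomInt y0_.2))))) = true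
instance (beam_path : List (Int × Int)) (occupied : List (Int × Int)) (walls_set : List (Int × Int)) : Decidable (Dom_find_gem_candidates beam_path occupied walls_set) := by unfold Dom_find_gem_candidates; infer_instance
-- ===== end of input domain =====

-- B inverts the traversal: it scans all GRID×GRID cells in row-major (already sorted) order and
-- appends a free cell when one of its four neighbors is on the beam path, so B needs no set and no
-- final sort (objective: alternative decomposition, similar cost on this fixed 6×6 grid).

def GRID : Int := 6

-- ===== PORT A =====
def find_gem_candidates (beam_path : List (Int × Int)) (occupied : List (Int × Int)) (walls_set : List (Int × Int)) : List (Int × Int) :=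
  let candidates : PySem.Set (Int × Int) :=
    beam_path.foldl (fun candidates rc =>
      [((-1 : Int), (0 : Int)), (1, 0), (0, -1), (0, 1)].foldl (fun candidates d =>
        let nr := rc.1 + d.1
        let nc := rc.2 + d.2
        if (decide (0 ≤ nr) && decide (nr < GRID) && decide (0 ≤ nc) && decide (nc < GRID)
            && !(beam_path.contains (nr, nc)) && !(occupied.contains (nr, nc))
            && !(walls_set.contains (nr, nc))) = true
        then PySem.Set.add candidates (nr, nc) else candidates) candidates)
      PySem.Set.empty
  PySem.List.sorted2 candidates Prod.fst Prod.snd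

-- ===== PORT B =====
def find_gem_candidates_alt (beam_path : List (Int × Int)) (occupied : List (Int × Int)) (walls_set : List (Int × Int)) : List (Int × Int) :=
  (PySem.List.pyRange 0 GRID 1).foldl (fun result r =>
    (PySem.List.pyRange 0 GRID 1).foldl (fun result c =>
      if (beam_path.contains (r, c) || occupied.contains (r, c) || walls_set.contains (r, c)) = true
      then result
      else if ([(r - 1, c), (r + 1, c), (r, c - 1), (r, c + 1)].any fun n => beam_path.contains n) = true
      then result ++ [(r, c)]
      else result) result) []

-- ===== PRECONDITION & SPEC =====
def Spec_find_gem_candidates (beam_path : List (Int × Int)) (occupied : List (Int × Int)) (walls_set : List (Int × Int)) (out : List (Int × Int)) : Prop := out = find_gem_candidates_alt beam_path occupied walls_set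
instance (beam_path : List (Int × Int)) (occupied : List (Int × Int)) (walls_set : List (Int × Int)) (out : List (Int × Int)) : Decidable (Spec_find_gem_candidates beam_path occupied walls_set out) := by unfold Spec_find_gem_candidates; infer_instance

-- ===== CLAIM (what is proved, stated in full; the proofs are below) =====
def Claim_equal_find_gem_candidates : Prop := ∀ (beam_path : List (Int × Int)) (occupied : List (Int × Int)) (walls_set : List (Int × Int)), Dom_find_gem_candidates beam_path occupied walls_set → Spec_find_gem_candidates beam_path occupied walls_set (find_gem_candidates beam_path occupied walls_set)

-- ===== LEMMAS AND PROOFS =====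

-- the four neighbors of a cell
def pvNbrs (p : Int × Int) : List (Int × Int) := [(p.1 - 1, p.2), (p.1 + 1, p.2), (p.1, p.2 - 1), (p.1, p.2 + 1)]

-- A's admission test for a candidate cell
def pvCond (bp occ w : List (Int × Int)) (p : Int × Int) : Bool :=
  decide (0 ≤ p.1) && decide (p.1 < GRID) && decide (0 ≤ p.2) && decide (p.2 < GRID)
    && !(bp.contains p) && !(occ.contains p) && !(w.contains p)

-- A's inner loop over the four directions
def pvInner (bp occ w : List (Int × Int)) (cand : PySem.Set (Int × Int)) (rc : Int × Int) : PySem.Set (Int × Int) :=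
  [((-1 : Int), (0 : Int)), (1, 0), (0, -1), (0, 1)].foldl (fun candidates d =>
    let nr := rc.1 + d.1
    let nc := rc.2 + d.2
    if (decide (0 ≤ nr) && decide (nr < GRID) && decide (0 ≤ nc) && decide (nc < GRID)
        && !(bp.contains (nr, nc)) && !(occ.contains (nr, nc)) && !(w.contains (nr, nc))) = true
    then PySem.Set.add candidates (nr, nc) else candidates) cand

-- A's candidate set
def pvSetA (bp occ w : List (Int × Int)) : PySem.Set (Int × Int) :=
  bp.foldl (pvInner bp occ w) PySem.Set.empty

lemma find_gem_candidates_eq (bp occ w : List (Int × Int)) :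
    find_gem_candidates bp occ w = PySem.List.sorted2 (pvSetA bp occ w) Prod.fst Prod.snd := rfl

lemma mem_ite_add (cand : PySem.Set (Int × Int)) (b : Bool) (y x : Int × Int) :
    (x ∈ if b = true then PySem.Set.add cand y else cand) ↔ x ∈ cand ∨ (b = true ∧ x = y) := by
  cases b <;> simp [PySem.Set.mem_add]

lemma mem_pvInner (bp occ w : List (Int × Int)) (cand : PySem.Set (Int × Int)) (rc x : Int × Int) :
    x ∈ pvInner bp occ w cand rc ↔ x ∈ cand ∨ (pvCond bp occ w x = true ∧ x ∈ pvNbrs rc) := by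
  have e : ∀ z : Int, z + -1 = z - 1 := fun z => by ring
  simp only [pvInner, List.foldl, mem_ite_add, e, add_zero, pvNbrs, List.mem_cons, List.not_mem_nil, or_false]
  constructor
  · rintro ((((h | ⟨hc, rfl⟩) | ⟨hc, rfl⟩) | ⟨hc, rfl⟩) | ⟨hc, rfl⟩)
    · exact Or.inl h
    all_goals exact Or.inr ⟨by simpa [pvCond] using hc, by simp⟩
  · rintro (h | ⟨hc, (rfl | rfl | rfl | rfl)⟩)
    · exact Or.inl (Or.inl (Or.inl (Or.inl h)))
    · exact Or.inl (Or.inl (Or.inl (Or.inr ⟨by simpa [pvCond] using hc, rfl⟩)))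
    · exact Or.inl (Or.inl (Or.inr ⟨by simpa [pvCond] using hc, rfl⟩))
    · exact Or.inl (Or.inr ⟨by simpa [pvCond] using hc, rfl⟩)
    · exact Or.inr ⟨by simpa [pvCond] using hc, rfl⟩

lemma mem_foldl_pvInner (bp occ w : List (Int × Int)) (x : Int × Int) :
    ∀ (l : List (Int × Int)) (cand : PySem.Set (Int × Int)),
      x ∈ l.foldl (pvInner bp occ w) cand ↔
        x ∈ cand ∨ ∃ rc ∈ l, pvCond bp occ w x = true ∧ x ∈ pvNbrs rc := by
  intro l
  induction l with
  | nil => intro cand; simp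
  | cons h t ih =>
      intro cand
      simp only [List.foldl_cons, ih, mem_pvInner, List.mem_cons]
      constructor
      · rintro ((hc | hh) | ⟨rc, hrc, hx⟩)
        · exact Or.inl hc
        · exact Or.inr ⟨h, Or.inl rfl, hh⟩
        · exact Or.inr ⟨rc, Or.inr hrc, hx⟩
      · rintro (hc | ⟨rc, (rfl | hrc), hx⟩)
        · exact Or.inl (Or.inl hc)
        · exact Or.inl (Or.inr hx)
        · exact Or.inr ⟨rc, hrc, hx⟩

lemma nodup_ite_add (cand : PySem.Set (Int × Int)) (b : Bool) (y : Int × Int)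
    (h : cand.Nodup) : (if b = true then PySem.Set.add cand y else cand).Nodup := by
  cases b
  · simpa using h
  · simpa using PySem.Set.nodup_add cand y h

lemma nodup_pvInner (bp occ w : List (Int × Int)) (cand : PySem.Set (Int × Int)) (rc : Int × Int)
    (h : cand.Nodup) : (pvInner bp occ w cand rc).Nodup := by
  simp only [pvInner, List.foldl]
  exact nodup_ite_add _ _ _ (nodup_ite_add _ _ _ (nodup_ite_add _ _ _ (nodup_ite_add _ _ _ h)))

lemma nodup_foldl_pvInner (bp occ w : List (Int × Int)) :
    ∀ (l : List (Int × Int)) (cand : PySem.Set (Int × Int)), cand.Nodup →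
      (l.foldl (pvInner bp occ w) cand).Nodup := by
  intro l
  induction l with
  | nil => intro cand h; exact h
  | cons x t ih => intro cand h; exact ih _ (nodup_pvInner _ _ _ _ _ h)

lemma nodup_pvSetA (bp occ w : List (Int × Int)) : (pvSetA bp occ w).Nodup :=
  nodup_foldl_pvInner bp occ w bp PySem.Set.empty List.nodup_nil

lemma mem_pvSetA (bp occ w : List (Int × Int)) (x : Int × Int) :
    x ∈ pvSetA bp occ w ↔ pvCond bp occ w x = true ∧ ∃ rc ∈ bp, x ∈ pvNbrs rc := by
  unfold pvSetA
  rw [mem_foldl_pvInner]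
  constructor
  · rintro (h | ⟨rc, hrc, hc, hx⟩)
    · simp [PySem.Set.empty] at h
    · exact ⟨hc, rc, hrc, hx⟩
  · rintro ⟨hc, rc, hrc, hx⟩
    exact Or.inr ⟨rc, hrc, hc, hx⟩

-- ===== B as a filter of the row-major cell list =====

def pvCells : List (Int × Int) :=
  (PySem.List.pyRange 0 GRID 1).flatMap (fun r => (PySem.List.pyRange 0 GRID 1).map (fun c => (r, c)))

def pvQ (bp occ w : List (Int × Int)) (p : Int × Int) : Bool :=
  !(bp.contains p || occ.contains p || w.contains p) && (pvNbrs p).any (fun n => bp.contains n)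

lemma alt_eq_filter (bp occ w : List (Int × Int)) :
    find_gem_candidates_alt bp occ w = pvCells.filter (pvQ bp occ w) := by
  unfold find_gem_candidates_alt pvCells
  have hstep : ∀ (acc : List (Int × Int)) (r c : Int),
      (if (bp.contains (r, c) || occ.contains (r, c) || w.contains (r, c)) = true
       then acc
       else if ([(r - 1, c), (r + 1, c), (r, c - 1), (r, c + 1)].any fun n => bp.contains n) = true
       then acc ++ [(r, c)]
       else acc)
      = if pvQ bp occ w (r, c) = true then acc ++ [(r, c)] else acc := by
    intro acc r c
    show _ = if (!(bp.contains (r, c) || occ.contains (r, c) || w.contains (r, c))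
        && ([(r - 1, c), (r + 1, c), (r, c - 1), (r, c + 1)].any fun n => bp.contains n)) = true
      then acc ++ [(r, c)] else acc
    cases hb : (bp.contains (r, c) || occ.contains (r, c) || w.contains (r, c)) <;>
      cases ha : ([(r - 1, c), (r + 1, c), (r, c - 1), (r, c + 1)].any fun n => bp.contains n) <;>
      simp only [Bool.not_true, Bool.not_false, Bool.and_false,
        Bool.and_true, if_true, if_false, Bool.false_eq_true]
  have hinner : ∀ (r : Int) (acc : List (Int × Int)),
      ((PySem.List.pyRange 0 GRID 1).foldl (fun result c =>
        if (bp.contains (r, c) || occ.contains (r, c) || w.contains (r, c)) = true then result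
        else if ([(r - 1, c), (r + 1, c), (r, c - 1), (r, c + 1)].any fun n => bp.contains n) = true
        then result ++ [(r, c)] else result) acc)
      = ((PySem.List.pyRange 0 GRID 1).map (fun c => (r, c))).foldl
          (fun result p => if pvQ bp occ w p = true then result ++ [p] else result) acc := by
    intro r acc
    rw [List.foldl_map]
    exact List.foldl_ext _ _ acc (fun a b _ => hstep a r b)
  calc (PySem.List.pyRange 0 GRID 1).foldl (fun result r =>
        (PySem.List.pyRange 0 GRID 1).foldl (fun result c =>
          if (bp.contains (r, c) || occ.contains (r, c) || w.contains (r, c)) = true then result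
          else if ([(r - 1, c), (r + 1, c), (r, c - 1), (r, c + 1)].any fun n => bp.contains n) = true
          then result ++ [(r, c)] else result) result) []
      = (PySem.List.pyRange 0 GRID 1).foldl (fun result r =>
          ((PySem.List.pyRange 0 GRID 1).map (fun c => (r, c))).foldl
            (fun result p => if pvQ bp occ w p = true then result ++ [p] else result) result) [] := by
        exact List.foldl_ext _ _ [] (fun a b _ => hinner b a)
    _ = _ := by
        rw [← List.foldl_flatMap]
        simpa using PySem.List.foldl_append_if (pvQ bp occ w) id
          ((PySem.List.pyRange 0 GRID 1).flatMap fun r => (PySem.List.pyRange 0 GRID 1).map fun c => (r, c)) []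

lemma mem_pvCells (p : Int × Int) :
    p ∈ pvCells ↔ 0 ≤ p.1 ∧ p.1 < GRID ∧ 0 ≤ p.2 ∧ p.2 < GRID := by
  simp only [pvCells, List.mem_flatMap, List.mem_map, PySem.List.mem_pyRange_one]
  constructor
  · rintro ⟨r, hr, c, hc, rfl⟩
    exact ⟨hr.1, hr.2, hc.1, hc.2⟩
  · rintro ⟨h1, h2, h3, h4⟩
    exact ⟨p.1, ⟨h1, h2⟩, p.2, ⟨h3, h4⟩, rfl⟩

lemma mem_pvNbrs_comm (a b : Int × Int) : a ∈ pvNbrs b ↔ b ∈ pvNbrs a := by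
  simp only [pvNbrs, List.mem_cons, List.not_mem_nil, or_false, Prod.ext_iff]
  omega

lemma mem_setA_iff_filter (bp occ w : List (Int × Int)) (x : Int × Int) :
    x ∈ pvSetA bp occ w ↔ x ∈ pvCells.filter (pvQ bp occ w) := by
  rw [mem_pvSetA, List.mem_filter, mem_pvCells]
  simp only [pvCond, pvQ, Bool.and_eq_true, Bool.not_eq_true',
    Bool.or_eq_false_iff, decide_eq_true_eq, List.any_eq_true, List.contains_iff_mem]
  constructor
  · rintro ⟨⟨⟨⟨⟨⟨⟨h1, h2⟩, h3⟩, h4⟩, hbp⟩, hocc⟩, hw⟩, rc, hrc, hx⟩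
    exact ⟨⟨h1, h2, h3, h4⟩, ⟨⟨hbp, hocc⟩, hw⟩, rc, (mem_pvNbrs_comm rc x).mpr hx, hrc⟩
  · rintro ⟨⟨h1, h2, h3, h4⟩, ⟨⟨hbp, hocc⟩, hw⟩, rc, hmem, hrc⟩
    exact ⟨⟨⟨⟨⟨⟨⟨h1, h2⟩, h3⟩, h4⟩, hbp⟩, hocc⟩, hw⟩, rc, hrc, (mem_pvNbrs_comm rc x).mp hmem⟩

-- ===== ordering =====

def pvKey (p : Int × Int) : Int := p.1 * 6 + p.2

lemma pvCells_pairwise : pvCells.Pairwise (fun a b => pvKey a < pvKey b) := by decide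

lemma filter_pairwise (bp occ w : List (Int × Int)) :
    (pvCells.filter (pvQ bp occ w)).Pairwise (fun a b => pvKey a < pvKey b) :=
  pvCells_pairwise.sublist List.filter_sublist

lemma filter_nodup (bp occ w : List (Int × Int)) : (pvCells.filter (pvQ bp occ w)).Nodup :=
  (filter_pairwise bp occ w).imp (fun h => by rintro rfl; omega)

lemma pvInGrid_of_mem_setA (bp occ w : List (Int × Int)) (x : Int × Int)
    (h : x ∈ pvSetA bp occ w) : 0 ≤ x.1 ∧ x.1 < GRID ∧ 0 ≤ x.2 ∧ x.2 < GRID := by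
  have := ((mem_pvSetA bp occ w x).mp h).1
  simp only [pvCond, Bool.and_eq_true, decide_eq_true_eq] at this
  exact ⟨this.1.1.1.1.1.1, this.1.1.1.1.1.2, this.1.1.1.1.2, this.1.1.1.2⟩

lemma before_eq_key (a b : Int × Int)
    (ha : 0 ≤ a.1 ∧ a.1 < GRID ∧ 0 ≤ a.2 ∧ a.2 < GRID)
    (hb : 0 ≤ b.1 ∧ b.1 < GRID ∧ 0 ≤ b.2 ∧ b.2 < GRID) :
    (decide (a.1 < b.1) || (!decide (b.1 < a.1) && decide (a.2 < b.2))) = decide (pvKey a < pvKey b) := by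
  simp only [GRID] at ha hb
  rw [show (!decide (b.1 < a.1)) = decide (¬ (b.1 < a.1)) from decide_not.symm,
    ← Bool.decide_and, ← Bool.decide_or, decide_eq_decide]
  simp only [pvKey]
  omega

lemma insertBy_congr {α : Type} (b1 b2 : α → α → Bool) (x : α) :
    ∀ (ys : List α), (∀ y ∈ ys, b1 x y = b2 x y) →
      PySem.List.insertBy b1 x ys = PySem.List.insertBy b2 x ys := by
  intro ys
  induction ys with
  | nil => intro; rfl
  | cons y t ih =>
      intro h
      simp only [PySem.List.insertBy]
      rw [h y (List.mem_cons_self ..), ih (fun z hz => h z (List.mem_cons_of_mem _ hz))]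

lemma foldl_insertBy_congr {α : Type} (b1 b2 : α → α → Bool) (P : α → Prop)
    (hagree : ∀ a b, P a → P b → b1 a b = b2 a b) :
    ∀ (xs acc : List α), (∀ x ∈ xs, P x) → (∀ x ∈ acc, P x) →
      xs.foldl (fun acc x => PySem.List.insertBy b1 x acc) acc
        = xs.foldl (fun acc x => PySem.List.insertBy b2 x acc) acc := by
  intro xs
  induction xs with
  | nil => intros; rfl
  | cons x t ih =>
      intro acc hxs hacc
      have hx : P x := hxs x (List.mem_cons_self ..)
      simp only [List.foldl_cons]
      rw [insertBy_congr b1 b2 x acc (fun y hy => hagree x y hx (hacc y hy))]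
      exact ih _ (fun z hz => hxs z (List.mem_cons_of_mem _ hz))
        (fun z hz => by
          rcases (PySem.List.mem_insertBy b2 x z acc).mp hz with rfl | hz'
          · exact hx
          · exact hacc z hz')

lemma main_eq (bp occ w : List (Int × Int)) :
    find_gem_candidates bp occ w = find_gem_candidates_alt bp occ w := by
  rw [find_gem_candidates_eq, alt_eq_filter]
  have h1 : PySem.List.sorted2 (pvSetA bp occ w) Prod.fst Prod.snd
      = (pvSetA bp occ w).foldl (fun acc x =>
          PySem.List.insertBy (fun a b => decide (pvKey a < pvKey b)) x acc) [] := by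
    show (pvSetA bp occ w).foldl (fun acc x =>
        PySem.List.insertBy (fun a b =>
          decide (a.1 < b.1) || (!decide (b.1 < a.1) && decide (a.2 < b.2))) x acc) [] = _
    exact foldl_insertBy_congr _ _
      (fun p => 0 ≤ p.1 ∧ p.1 < GRID ∧ 0 ≤ p.2 ∧ p.2 < GRID)
      before_eq_key _ [] (fun x hx => pvInGrid_of_mem_setA bp occ w x hx) (by simp)
  rw [h1, ← PySem.List.sorted_eq_foldl_insertBy]
  exact PySem.List.sorted_eq_of_perm_of_pairwise_lt _ _ pvKey
    (((List.perm_ext_iff_of_nodup (filter_nodup bp occ w) (nodup_pvSetA bp occ w)).mpr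
      (fun a => (mem_setA_iff_filter bp occ w a).symm)))
    (filter_pairwise bp occ w)

-- ===== VERDICT (by name: the statement is the Claim_ definition above) =====
theorem find_gem_candidates_spec : Claim_equal_find_gem_candidates := by
  intro bp occ w _
  show find_gem_candidates bp occ w = find_gem_candidates_alt bp occ w
  exact main_eq bp occ w
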